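-- pv_equiv track=rewrite | github.com/alecproj/DecisionTheoryApp | app/algorithms/example/parser.py | find_alt_header
-- ===== SOURCE A (Python) =====
-- from typing import Dict, Any, List, Optional
--
-- def _is_number(s: str) -> bool:
--     if not s or not s.strip():
--         return False
--     s = s.strip().replace(',', '.')
--     try:
--         float(s)
--         return True
--     except ValueError:
--         return False
--
-- def find_alt_header(rows: List[List[str]], pairwise_start: int, m: int) -> tuple[Optional[int], Optional[int]]:
--     alt_header_row = alt_start_col = None
--     for i in range(pairwise_start + m, len(rows)):
--         row = rows[i]
--         if len(row) < 2:
--             continue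
--         non_num = [j for j, cell in enumerate(row) if cell and not _is_number(cell)]
--         if len(non_num) >= 3:
--             non_num.sort()
--             current = [non_num[0]]
--             best = current[:]
--             for k in range(1, len(non_num)):
--                 if non_num[k] == non_num[k - 1] + 1:
--                     current.append(non_num[k])
--                 else:
--                     if len(current) > len(best):
--                         best = current
--                     current = [non_num[k]]
--             if len(current) > len(best):
--                 best = current
--             if len(best) >= 3:
--                 alt_start_col = best[0]
--                 alt_header_row = i
--                 break
--     return alt_header_row, alt_start_col
-- ===== SOURCE B (Python) =====
-- # Single pass per row: track the current and best (earliest longest) run of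
-- # non-numeric non-empty cells directly, instead of building an index list,
-- # sorting it and grouping consecutive indices.
-- from typing import List, Optional
--
--
-- def _is_number(s: str) -> bool:
--     if not s or not s.strip():
--         return False
--     s = s.strip().replace(',', '.')
--     try:
--         float(s)
--         return True
--     except ValueError:
--         return False
--
--
-- def find_alt_header(rows: List[List[str]], pairwise_start: int, m: int) -> tuple[Optional[int], Optional[int]]:
--     for i in range(pairwise_start + m, len(rows)):
--         best_len = best_start = 0
--         cur_len = cur_start = 0
--         for j, cell in enumerate(rows[i]):
--             if cell and not _is_number(cell):
--                 if cur_len == 0: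
--                     cur_start = j
--                 cur_len += 1
--                 if cur_len > best_len:
--                     best_len = cur_len
--                     best_start = cur_start
--             else:
--                 cur_len = 0
--         if best_len >= 3:
--             return i, best_start
--     return None, None
-- ===== Notes on version B (the rewrite author's own statement) =====
-- stated objective: simpler
-- what changed: Instead of collecting the non-numeric column indices into a list, sorting it and grouping consecutive indices into runs, B makes a single pass over each row's cells maintaining current-run and best-run (length, start) counters, with no intermediate list, sort, or separate length<2 / count>=3 gates.
import Mathlib
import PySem

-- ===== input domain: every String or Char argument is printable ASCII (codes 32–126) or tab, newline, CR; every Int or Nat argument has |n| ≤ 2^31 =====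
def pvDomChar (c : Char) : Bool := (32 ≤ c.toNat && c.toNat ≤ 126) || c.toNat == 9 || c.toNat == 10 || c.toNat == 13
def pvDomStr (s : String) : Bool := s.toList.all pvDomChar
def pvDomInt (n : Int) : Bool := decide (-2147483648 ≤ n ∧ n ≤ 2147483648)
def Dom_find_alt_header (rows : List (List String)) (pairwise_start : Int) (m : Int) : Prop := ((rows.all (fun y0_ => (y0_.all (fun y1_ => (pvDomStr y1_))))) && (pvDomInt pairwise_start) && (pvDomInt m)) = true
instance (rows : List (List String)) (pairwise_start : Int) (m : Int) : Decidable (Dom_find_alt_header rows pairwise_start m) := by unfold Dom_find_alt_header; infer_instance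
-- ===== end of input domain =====

-- B replaces A's build-index-list / sort / group-consecutive-runs per-row analysis by a
-- single pass over the cells maintaining current-run and best-run counters (objective: simpler).


-- ===== PORT A =====
-- shared helper `_is_number` (used verbatim by both Python versions).
-- `float(s)` acceptance is hand-ported (PySem has no float()); exact for the ASCII strings of Dom_:
-- optional sign, then (case-insensitively) inf/infinity/nan, or digits with single '_' separators,
-- an optional '.', and an optional exponent part.

-- digit (('_')? digit)* continuation after one digit has been read
def digitRunTail : List Char → Bool
  | [] => true
  | '_' :: c :: r => PySem.Chars.isdigit c && digitRunTail r
  | c :: r => PySem.Chars.isdigit c && digitRunTail r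

-- nonempty digit run with single underscores between digits
def digitRun : List Char → Bool
  | [] => false
  | c :: r => PySem.Chars.isdigit c && digitRunTail r

-- split at the first character satisfying p (none if absent)
def splitFirst (p : Char → Bool) : List Char → Option (List Char × List Char)
  | [] => none
  | c :: r =>
    if p c then some ([], r)
    else match splitFirst p r with
      | none => none
      | some (a, b) => some (c :: a, b)

-- [digitpart] ['.' [digitpart]] with at least one digit
def floatMantissa (cs : List Char) : Bool :=
  match splitFirst (fun c => c = '.') cs with
  | none => digitRun cs
  | some (a, b) => if a = [] then digitRun b else digitRun a && (b = [] || digitRun b)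

-- exponent body: optional sign then a digit run
def floatExp (cs : List Char) : Bool :=
  match cs with
  | '+' :: r => digitRun r
  | '-' :: r => digitRun r
  | _ => digitRun cs

def floatAccept (cs : List Char) : Bool :=
  match splitFirst (fun c => c = 'e' || c = 'E') cs with
  | none => floatMantissa cs
  | some (a, b) => floatMantissa a && floatExp b

-- float(s) succeeds (s already stripped)
def floatParsable (cs : List Char) : Bool :=
  let body := match cs with
    | '+' :: r => r
    | '-' :: r => r
    | _ => cs
  let low := body.map PySem.Chars.lowerChar
  if low = ['i', 'n', 'f'] || low = ['i', 'n', 'f', 'i', 'n', 'i', 't', 'y'] || low = ['n', 'a', 'n'] then true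
  else floatAccept body

-- def _is_number(s)
def isNumber (s : String) : Bool :=
  if s.toList = [] || PySem.Chars.strip s.toList = [] then false
  else floatParsable (PySem.Chars.replace (PySem.Chars.strip s.toList) [','] ['.'])

-- non_num = [j for j, cell in enumerate(row) if cell and not _is_number(cell)]
def nonNumIdx (row : List String) : List Int :=
  (PySem.List.enumerate row 0).filterMap
    (fun jc => if jc.2 != "" && !isNumber jc.2 then some jc.1 else none)

-- the `for k in range(1, len(non_num))` grouping loop; prev is non_num[k-1]
def runsA : Int → List Int → List Int → List Int → List Int × List Int
  | _, [], current, best => (current, best)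
  | prev, x :: rest, current, best =>
    if x = prev + 1 then runsA x rest (current ++ [x]) best
    else runsA x rest [x] (if current.length > best.length then current else best)

-- the `for i in range(pairwise_start + m, len(rows))` loop with its break
def loopA (rows : List (List String)) : List Int → Option Int × Option Int
  | [] => (none, none)
  | i :: rest =>
    match PySem.List.pyGet? rows i with
    | none => (none, none)  -- IndexError: excluded by Pre_
    | some row =>
      if row.length < 2 then loopA rows rest
      else
        let non_num := nonNumIdx row
        if 3 ≤ non_num.length then
          match PySem.List.sorted non_num (fun x => x) false with
          | [] => loopA rows rest  -- unreachable: non_num has ≥ 3 elements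
          | h :: t =>
            let cb := runsA h t [h] [h]
            let best := if cb.1.length > cb.2.length then cb.1 else cb.2
            if 3 ≤ best.length then (some i, some best.headI)  -- best[0]; best nonempty here
            else loopA rows rest
        else loopA rows rest
termination_by idxs => idxs.length

def find_alt_header (rows : List (List String)) (pairwise_start : Int) (m : Int) : Option Int × Option Int :=
  loopA rows (PySem.List.pyRange (pairwise_start + m) (rows.length : Int) 1)

-- ===== PORT B =====
-- state (best_len, best_start, cur_len, cur_start); one cell of B's inner loop
def stepB (st : Int × Int × Int × Int) (jc : Int × String) : Int × Int × Int × Int :=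
  let (bl, bs, cl, cs) := st
  if jc.2 != "" && !isNumber jc.2 then
    let cs' := if cl = 0 then jc.1 else cs
    let cl' := cl + 1
    if cl' > bl then (cl', cs', cl', cs') else (bl, bs, cl', cs')
  else (bl, bs, 0, cs)

def loopB (rows : List (List String)) : List Int → Option Int × Option Int
  | [] => (none, none)
  | i :: rest =>
    match PySem.List.pyGet? rows i with
    | none => (none, none)  -- IndexError: excluded by Pre_
    | some row =>
      let st := (PySem.List.enumerate row 0).foldl stepB (0, 0, 0, 0)
      if 3 ≤ st.1 then (some i, some st.2.1) else loopB rows rest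
termination_by idxs => idxs.length

def find_alt_header_alt (rows : List (List String)) (pairwise_start : Int) (m : Int) : Option Int × Option Int :=
  loopB rows (PySem.List.pyRange (pairwise_start + m) (rows.length : Int) 1)

-- ===== PRECONDITION & SPEC =====
-- Pre_ excludes exactly the inputs where A raises IndexError: a start index below -len(rows)
-- makes the first iteration's rows[i] access go out of range.
def Pre_find_alt_header (rows : List (List String)) (pairwise_start : Int) (m : Int) : Prop :=
  -(rows.length : Int) ≤ pairwise_start + m
instance (rows : List (List String)) (pairwise_start : Int) (m : Int) : Decidable (Pre_find_alt_header rows pairwise_start m) := by unfold Pre_find_alt_header; infer_instance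

def pvWitness_find_alt_header : List (List String) × Int × Int := ([["lorem", "ipsum", "dolor"], ["1", "2"]], 0, 0)

def Spec_find_alt_header (rows : List (List String)) (pairwise_start : Int) (m : Int) (out : Option Int × Option Int) : Prop := out = find_alt_header_alt rows pairwise_start m
instance (rows : List (List String)) (pairwise_start : Int) (m : Int) (out : Option Int × Option Int) : Decidable (Spec_find_alt_header rows pairwise_start m out) := by unfold Spec_find_alt_header; infer_instance

-- ===== CLAIM (what is proved, stated in full; the proofs are below) =====
def Claim_equal_find_alt_header : Prop := ∀ (rows : List (List String)) (pairwise_start : Int) (m : Int), Dom_find_alt_header rows pairwise_start m → Pre_find_alt_header rows pairwise_start m → Spec_find_alt_header rows pairwise_start m (find_alt_header rows pairwise_start m)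

-- ===== LEMMAS AND PROOFS =====

-- the cell predicate both versions use
def pcell (c : String) : Bool := c != "" && !isNumber c

-- non-numeric indices of a row enumerated from an arbitrary start
def nnF (k : Int) (row : List String) : List Int :=
  (PySem.List.enumerate row k).filterMap (fun jc => if pcell jc.2 then some jc.1 else none)

-- A's merged candidate: the better of current and best (current wins only if strictly longer)
def mlist (cur best : List Int) : List Int := if cur.length > best.length then cur else best

lemma nnF_zero (row : List String) : nonNumIdx row = nnF 0 row := rfl

lemma nnF_cons (k : Int) (c : String) (row : List String) :
    nnF k (c :: row) = if pcell c then k :: nnF (k + 1) row else nnF (k + 1) row := by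
  simp only [nnF, PySem.List.enumerate_cons, List.filterMap_cons]
  by_cases h : pcell c <;> simp [h]

-- length bound for runsA: no run can be longer than what it was fed
lemma runsA_bound (rest : List Int) : ∀ (prev : Int) (cur best : List Int),
    (runsA prev rest cur best).1.length ≤ cur.length + rest.length ∧
    ((runsA prev rest cur best).2.length ≤ best.length ∨
      (runsA prev rest cur best).2.length ≤ cur.length + rest.length) := by
  induction rest with
  | nil => intro prev cur best; simp [runsA]
  | cons x rest ih =>
    intro prev cur best
    simp only [runsA]
    split
    · obtain ⟨h1, h2⟩ := ih x (cur ++ [x]) best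
      simp only [List.length_append, List.length_cons, List.length_nil] at h1 h2 ⊢
      refine ⟨by omega, ?_⟩
      rcases h2 with h | h
      · left; omega
      · right; omega
    · by_cases hc : cur.length > best.length
      · rw [if_pos hc]
        obtain ⟨h1, h2⟩ := ih x [x] cur
        simp only [List.length_cons, List.length_nil] at h1 h2 ⊢
        refine ⟨by omega, ?_⟩
        rcases h2 with h | h
        · right; omega
        · right; omega
      · rw [if_neg hc]
        obtain ⟨h1, h2⟩ := ih x [x] best
        simp only [List.length_cons, List.length_nil] at h1 h2 ⊢
        refine ⟨by omega, ?_⟩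
        rcases h2 with h | h
        · left; omega
        · right; omega

-- reducing one step of B's fold on a non-numeric / numeric-or-empty cell
lemma stepB_true {c : String} (h : pcell c = true) (j bl bs cl cs : Int) :
    stepB (bl, bs, cl, cs) (j, c) =
      (if cl + 1 > bl then (cl + 1, (if cl = 0 then j else cs), cl + 1, (if cl = 0 then j else cs))
       else (bl, bs, cl + 1, (if cl = 0 then j else cs))) := by
  have h' : (c != "" && !isNumber c) = true := h
  simp [stepB, h']

lemma stepB_false {c : String} (h : pcell c = false) (j bl bs cl cs : Int) :
    stepB (bl, bs, cl, cs) (j, c) = (bl, bs, 0, cs) := by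
  have h' : (c != "" && !isNumber c) = false := h
  simp [stepB, h']

lemma headI_append_left {α : Type} [Inhabited α] {l : List α} (l' : List α) (h : l ≠ []) :
    (l ++ l').headI = l.headI := by
  cases l with
  | nil => exact absurd rfl h
  | cons a t => rfl

lemma mlist_short {l m : List Int} (h : l.length ≤ m.length) : mlist l m = m := by
  simp only [mlist]
  rw [if_neg (show ¬ l.length > m.length by omega)]

-- main invariant: once a run has started, B's fold tracks A's (current, best) pair
lemma stream_inv (row : List String) : ∀ (k prev : Int) (cur best : List Int) (bl bs cl cs : Int),
    cur ≠ [] → prev < k →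
    bl = ((mlist cur best).length : Int) → bs = (mlist cur best).headI →
    (if prev = k - 1 then cl = (cur.length : Int) ∧ cs = cur.headI else cl = 0) →
    ((PySem.List.enumerate row k).foldl stepB (bl, bs, cl, cs)).1
        = ((mlist (runsA prev (nnF k row) cur best).1 (runsA prev (nnF k row) cur best).2).length : Int) ∧
    ((PySem.List.enumerate row k).foldl stepB (bl, bs, cl, cs)).2.1
        = (mlist (runsA prev (nnF k row) cur best).1 (runsA prev (nnF k row) cur best).2).headI := by
  induction row with
  | nil =>
    intro k prev cur best bl bs cl cs hcur hk hbl hbs hcl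
    simp [PySem.List.enumerate_nil, nnF, runsA, hbl, hbs]
  | cons c row ih =>
    intro k prev cur best bl bs cl cs hcur hk hbl hbs hcl
    have hcurlen : cur.length ≠ 0 := by simpa using hcur
    have hmge_cur : cur.length ≤ (mlist cur best).length := by
      simp only [mlist]; split <;> omega
    have hmge_best : best.length ≤ (mlist cur best).length := by
      simp only [mlist]; split <;> omega
    rw [PySem.List.enumerate_cons, List.foldl_cons, nnF_cons]
    by_cases hp : pcell c = true
    · rw [if_pos hp, stepB_true hp]
      simp only [runsA]
      by_cases hkp : k = prev + 1
      · rw [if_pos hkp]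
        rw [if_pos (show prev = k - 1 by omega)] at hcl
        obtain ⟨hcl1, hcl2⟩ := hcl
        have hclne : ¬ cl = 0 := by rw [hcl1]; simp; omega
        rw [if_neg hclne]
        by_cases hgt : cl + 1 > bl
        · rw [if_pos hgt]
          have hlen : best.length < (cur ++ [k]).length := by
            simp only [List.length_append, List.length_cons, List.length_nil]
            omega
          have hm : mlist (cur ++ [k]) best = cur ++ [k] := by
            simp only [mlist]; rw [if_pos hlen]
          apply ih (k + 1) k (cur ++ [k]) best
          · simp
          · omega
          · rw [hm]; simp only [List.length_append, List.length_cons, List.length_nil]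
            push_cast; omega
          · rw [hm, headI_append_left _ hcur]; exact hcl2
          · rw [if_pos (show k = k + 1 - 1 by omega)]
            constructor
            · simp only [List.length_append, List.length_cons, List.length_nil]
              push_cast; omega
            · rw [headI_append_left _ hcur]; exact hcl2
        · rw [if_neg hgt]
          have hle : cur.length ≤ best.length := by
            by_contra hgt2
            have hmc : mlist cur best = cur := by
              simp only [mlist]; rw [if_pos (by omega)]
            rw [hmc] at hbl; omega
          have hmb : mlist cur best = best := by
            simp only [mlist]; rw [if_neg (by omega)]
          rw [hmb] at hbl
          have hmb2 : mlist (cur ++ [k]) best = best := by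
            simp only [mlist]
            rw [if_neg (by simp only [List.length_append, List.length_cons, List.length_nil]; omega)]
          apply ih (k + 1) k (cur ++ [k]) best
          · simp
          · omega
          · rw [hmb2]; exact hbl
          · rw [hmb2]; rw [hmb] at hbs; exact hbs
          · rw [if_pos (show k = k + 1 - 1 by omega)]
            constructor
            · simp only [List.length_append, List.length_cons, List.length_nil]
              push_cast; omega
            · rw [headI_append_left _ hcur]; exact hcl2
      · rw [if_neg hkp]
        rw [if_neg (show ¬ prev = k - 1 by omega)] at hcl
        rw [if_pos hcl]
        have hble : (1 : Int) ≤ bl := by rw [hbl]; omega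
        rw [if_neg (show ¬ (cl + 1 > bl) by omega)]
        rw [show (if cur.length > best.length then cur else best) = mlist cur best from rfl]
        have hmm : mlist [k] (mlist cur best) = mlist cur best :=
          mlist_short (by simp only [List.length_cons, List.length_nil]; omega)
        apply ih (k + 1) k [k] (mlist cur best)
        · simp
        · omega
        · rw [hmm]; exact hbl
        · rw [hmm]; exact hbs
        · rw [if_pos (show k = k + 1 - 1 by omega)]
          exact ⟨by simp [hcl], rfl⟩
    · have hp' : pcell c = false := by revert hp; cases pcell c <;> simp
      rw [if_neg (by simp [hp']), stepB_false hp']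
      apply ih (k + 1) prev cur best bl bs 0 cs hcur (by omega) hbl hbs
      rw [if_neg (show ¬ prev = k + 1 - 1 by omega)]

-- from the all-zero initial state: either no non-numeric cell ever occurs, or B's fold
-- agrees with A's grouping started at the first one
lemma stream_start (row : List String) : ∀ (k bs cs : Int),
    (nnF k row = [] ∧ (PySem.List.enumerate row k).foldl stepB (0, bs, 0, cs) = (0, bs, 0, cs)) ∨
    (∃ h t, nnF k row = h :: t ∧
      ((PySem.List.enumerate row k).foldl stepB (0, bs, 0, cs)).1
          = ((mlist (runsA h t [h] [h]).1 (runsA h t [h] [h]).2).length : Int) ∧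
      ((PySem.List.enumerate row k).foldl stepB (0, bs, 0, cs)).2.1
          = (mlist (runsA h t [h] [h]).1 (runsA h t [h] [h]).2).headI) := by
  induction row with
  | nil => intro k bs cs; left; simp [nnF, PySem.List.enumerate_nil]
  | cons c row ih =>
    intro k bs cs
    rw [PySem.List.enumerate_cons, List.foldl_cons, nnF_cons]
    by_cases hp : pcell c = true
    · right
      rw [if_pos hp, stepB_true hp]
      rw [if_pos rfl, if_pos (by omega : (0 : Int) + 1 > 0)]
      refine ⟨k, nnF (k + 1) row, rfl, ?_⟩
      apply stream_inv row (k + 1) k [k] [k] (0 + 1) k (0 + 1) k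
      · simp
      · omega
      · simp [mlist]
      · simp [mlist]
      · rw [if_pos (show k = k + 1 - 1 by omega)]
        exact ⟨by simp, rfl⟩
    · have hp' : pcell c = false := by revert hp; cases pcell c <;> simp
      rw [if_neg (by simp [hp']), stepB_false hp']
      exact ih (k + 1) bs cs

-- the sort in A is the identity: nnF is strictly increasing
lemma nnF_sorted (row : List String) (k : Int) :
    PySem.List.sorted (nnF k row) (fun x => x) false = nnF k row := by
  refine PySem.List.sorted_eq_of_perm_of_pairwise_lt (nnF k row) (nnF k row) (fun x => x) (List.Perm.refl _) ?_
  unfold nnF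
  rw [List.pairwise_filterMap]
  apply List.Pairwise.imp ?_ (PySem.List.pairwise_lt_enumerate row k)
  intro a b hab x hx y hy
  by_cases ha : pcell a.2 = true <;> by_cases hb2 : pcell b.2 = true <;>
    simp_all

lemma nnF_length_le (row : List String) (k : Int) : (nnF k row).length ≤ row.length := by
  have h1 := List.length_filterMap_le
    (fun (jc : Int × String) => if pcell jc.2 then some jc.1 else none)
    (PySem.List.enumerate row k)
  unfold nnF
  rw [PySem.List.length_enumerate] at h1
  exact h1

-- per-index-list equality of the two loops
lemma loop_eq (rows : List (List String)) : ∀ (idxs : List Int), loopA rows idxs = loopB rows idxs := by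
  intro idxs
  induction idxs with
  | nil => simp [loopA, loopB]
  | cons i rest ih =>
    simp only [loopA, loopB]
    cases hget : PySem.List.pyGet? rows i with
    | none => rfl
    | some row =>
      dsimp only
      rcases stream_start row 0 0 0 with ⟨hnil, hfold⟩ | ⟨h, t, hnn, hfold1, hfold2⟩
      · rw [hfold]
        have hzero : nonNumIdx row = [] := by rw [nnF_zero]; exact hnil
        rw [hzero]
        simp only [List.length_nil]
        rw [if_neg (by norm_num : ¬ (3 : Int) ≤ 0)]
        split
        · exact ih
        · rw [if_neg (by omega)]; exact ih
      · have hnn0 : nonNumIdx row = h :: t := by rw [nnF_zero]; exact hnn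
        have hb := runsA_bound t h [h] [h]
        set cb := runsA h t [h] [h] with hcb
        have hb1 := hb.1
        have hb2 := hb.2
        simp only [List.length_cons, List.length_nil] at hb1 hb2
        have hml_cur : (mlist cb.1 cb.2).length ≤ t.length + 1 := by
          simp only [mlist]; split
          · omega
          · rcases hb2 with h2 | h2 <;> omega
        have hlen_nn : (nnF 0 row).length ≤ row.length := nnF_length_le row 0
        rw [hnn] at hlen_nn
        simp only [List.length_cons] at hlen_nn
        rw [hnn0]
        have hsort : PySem.List.sorted (h :: t) (fun x => x) false = h :: t := by
          rw [← hnn0, nnF_zero, nnF_sorted]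
        have hB3 : ((3 : Int) ≤ (List.foldl stepB (0, 0, 0, 0) (PySem.List.enumerate row)).1)
            ↔ 3 ≤ (mlist cb.1 cb.2).length := by
          rw [hfold1]; exact ⟨fun hh => by exact_mod_cast hh, fun hh => by exact_mod_cast hh⟩
        by_cases h3 : 3 ≤ (mlist cb.1 cb.2).length
        · rw [if_pos (hB3.mpr h3)]
          rw [if_neg (by omega : ¬ row.length < 2)]
          rw [if_pos (by simp only [List.length_cons]; omega)]
          rw [hsort]
          dsimp only
          rw [show (if cb.1.length > cb.2.length then cb.1 else cb.2) = mlist cb.1 cb.2 from rfl]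
          rw [if_pos h3, hfold2]
        · rw [if_neg (fun hh => h3 (hB3.mp hh))]
          split
          · exact ih
          · split
            · rw [hsort]
              dsimp only
              rw [show (if cb.1.length > cb.2.length then cb.1 else cb.2) = mlist cb.1 cb.2 from rfl]
              rw [if_neg h3]
              exact ih
            · exact ih

-- ===== VERDICT (by name: the statement is the Claim_ definition above) =====
theorem find_alt_header_spec : Claim_equal_find_alt_header := by
  intro rows ps m _ _
  show _ = _
  simp only [find_alt_header, find_alt_header_alt]
  exact loop_eq rows _
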